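-- pv_equiv track=rewrite | github.com/arelsulistyo/Implementasi-AES | KKI_Kelompok 1_AES.py | rcon
-- ===== SOURCE A (Python) =====
-- def gmul(a, b):
--     p = 0
--
--     for _ in range(8):
--         if b & 1:
--             p ^= a
--
--         hi_bit_set = a & 0x80
--         a <<= 1
--         if hi_bit_set:
--             a ^= 0x1B
--
--         b >>= 1
--
--     return p & 0xFF
--
-- def rcon(in_val):
--     c = 1
--     if in_val == 0:
--         return 0
--     while in_val != 1:
--         c = gmul(c, 2)
--         in_val -= 1
--     return c
-- ===== SOURCE B (Python) =====
-- def gmul(a, b):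
--     p = 0
--
--     for _ in range(8):
--         if b & 1:
--             p ^= a
--
--         hi_bit_set = a & 0x80
--         a <<= 1
--         if hi_bit_set:
--             a ^= 0x1B
--
--         b >>= 1
--
--     return p & 0xFF
--
-- def rcon(in_val):
--     if in_val == 0:
--         return 0
--     e = in_val - 1
--     result = 1
--     base = 2
--     while e > 0:
--         if e & 1:
--             result = gmul(result, base)
--         base = gmul(base, base)
--         e >>= 1
--     return result
-- ===== Notes on version B (the rewrite author's own statement) =====
-- stated objective: faster
-- what changed: replaces the linear chain of in_val-1 doublings by square-and-multiply binary exponentiation in GF(2^8), O(log in_val) field multiplications instead of O(in_val)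
-- outside the precondition, e.g. on rcon(-1): A does not finish within the time limit, B returns 1
import Mathlib
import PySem

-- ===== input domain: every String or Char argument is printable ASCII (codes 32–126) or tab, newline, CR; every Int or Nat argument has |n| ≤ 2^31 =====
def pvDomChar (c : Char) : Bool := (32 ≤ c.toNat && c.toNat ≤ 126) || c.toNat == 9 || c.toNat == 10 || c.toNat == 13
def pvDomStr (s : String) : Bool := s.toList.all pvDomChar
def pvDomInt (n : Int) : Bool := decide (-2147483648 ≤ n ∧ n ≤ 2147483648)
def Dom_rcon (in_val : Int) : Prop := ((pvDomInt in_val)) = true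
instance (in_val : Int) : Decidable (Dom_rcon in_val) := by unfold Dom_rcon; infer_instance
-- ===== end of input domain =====

-- B replaces A's chain of in_val-1 doublings by square-and-multiply (O(log in_val) gmuls); return-value equivalence on in_val ≥ 0 (A loops forever on negatives).

-- ===== PORT A =====
-- gmul: 8 rounds over state (p, a, b); Python & ^ << >> via PySem.Int.band/bxor and <<< / >>>
def gmul (a b : Int) : Int :=
  let s := (List.range 8).foldl
    (fun (s : Int × Int × Int) _ =>
      let p := s.1; let a := s.2.1; let b := s.2.2
      let p := if PySem.Int.band b 1 ≠ 0 then PySem.Int.bxor p a else p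
      let hi_bit_set := PySem.Int.band a 0x80
      let a := a <<< (1 : Nat)
      let a := if hi_bit_set ≠ 0 then PySem.Int.bxor a 0x1B else a
      (p, a, b >>> (1 : Nat))) (0, a, b)
  PySem.Int.band s.1 0xFF

-- A's while-loop: runs while in_val ≠ 1, decrementing; on in_val ≥ 1 that is (in_val-1) iterations
def rconLoop : Nat → Int → Int
  | 0, c => c
  | n + 1, c => rconLoop n (gmul c 2)

def rcon (in_val : Int) : Int :=
  if in_val = 0 then 0
  else rconLoop (in_val - 1).toNat 1

-- ===== PORT B =====
-- square-and-multiply: while e > 0: if e & 1 multiply, square base, e >>= 1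
def sqmLoop (e : Nat) (result base : Int) : Int :=
  if e = 0 then result
  else sqmLoop (e / 2) (if e % 2 = 1 then gmul result base else result) (gmul base base)
decreasing_by exact Nat.div_lt_self (Nat.pos_of_ne_zero (by assumption)) (by omega)

def rcon_alt (in_val : Int) : Int :=
  if in_val = 0 then 0
  else sqmLoop (in_val - 1).toNat 1 2

-- ===== PRECONDITION & SPEC =====
-- A's while-loop never terminates for in_val < 0 (in_val only decreases), so A returns exactly on in_val ≥ 0.
def Pre_rcon (in_val : Int) : Prop := 0 ≤ in_val
instance (in_val : Int) : Decidable (Pre_rcon in_val) := by unfold Pre_rcon; infer_instance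
def pvWitness_rcon : Int := 9

def Spec_rcon (in_val : Int) (out : Int) : Prop := out = rcon_alt in_val
instance (in_val : Int) (out : Int) : Decidable (Spec_rcon in_val out) := by unfold Spec_rcon; infer_instance

-- ===== CLAIM (what is proved, stated in full; the proofs are below) =====
def Claim_equal_rcon : Prop := ∀ (in_val : Int), Dom_rcon in_val → Pre_rcon in_val → Spec_rcon in_val (rcon in_val)

-- ===== LEMMAS AND PROOFS =====

-- pow2 n = A's chain of n doublings starting from 1 (2^n in GF(2^8))
def pow2 (n : Nat) : Int := rconLoop n 1

-- the 51 distinct powers of 2 in GF(2^8) (multiplicative order of 0x02 is 51)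
def tbl (i : Nat) : Int :=
  [1, 2, 4, 8, 16, 32, 64, 128, 27, 54, 108, 216, 171, 77, 154, 47, 94, 188, 99, 198,
   151, 53, 106, 212, 179, 125, 250, 239, 197, 145, 57, 114, 228, 211, 189, 97, 194,
   159, 37, 74, 148, 51, 102, 204, 131, 29, 58, 116, 232, 203, 141].getD i 0

lemma rconLoop_add (a b : Nat) (c : Int) : rconLoop (a + b) c = rconLoop a (rconLoop b c) := by
  induction b generalizing c with
  | zero => rfl
  | succ b ih => rw [show a + (b + 1) = (a + b) + 1 from rfl, rconLoop, ih, rconLoop]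

set_option maxRecDepth 100000 in
set_option maxHeartbeats 2000000 in
lemma rconLoop_51 : rconLoop 51 1 = 1 := by decide

lemma pow2_add_51 (n : Nat) : pow2 (n + 51) = pow2 n := by
  unfold pow2
  rw [rconLoop_add, rconLoop_51]

lemma pow2_mod (n : Nat) : pow2 n = pow2 (n % 51) := by
  induction n using Nat.strong_induction_on with
  | _ n ih =>
    by_cases h : n < 51
    · rw [Nat.mod_eq_of_lt h]
    · have h1 : n = (n - 51) + 51 := by omega
      rw [h1, pow2_add_51, ih (n - 51) (by omega)]
      congr 1
      omega

set_option maxRecDepth 100000 in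
set_option maxHeartbeats 2000000 in
lemma pow2_tbl : ∀ i < 51, pow2 i = tbl i := by decide

set_option maxRecDepth 1000000 in
set_option maxHeartbeats 8000000 in
lemma gmul_tbl : ∀ i < 51, ∀ j < 51, gmul (tbl i) (tbl j) = tbl ((i + j) % 51) := by decide

lemma gmul_pow2 (i j : Nat) : gmul (pow2 i) (pow2 j) = pow2 (i + j) := by
  rw [pow2_mod i, pow2_mod j, pow2_mod (i + j),
    pow2_tbl _ (Nat.mod_lt _ (by omega)), pow2_tbl _ (Nat.mod_lt _ (by omega)),
    pow2_tbl _ (Nat.mod_lt _ (by omega)),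
    gmul_tbl _ (Nat.mod_lt _ (by omega)) _ (Nat.mod_lt _ (by omega))]
  congr 1
  omega

lemma sqmLoop_pow2 (e r b : Nat) : sqmLoop e (pow2 r) (pow2 b) = pow2 (r + e * b) := by
  induction e using Nat.strong_induction_on generalizing r b with
  | _ e ih =>
    rw [sqmLoop]
    by_cases h : e = 0
    · simp [h]
    · rw [if_neg h, gmul_pow2 b b]
      by_cases h2 : e % 2 = 1
      · rw [if_pos h2, gmul_pow2 r b, ih (e / 2) (Nat.div_lt_self (by omega) (by omega))]
        obtain ⟨q, rfl⟩ : ∃ q, e = 2 * q + 1 := ⟨e / 2, by omega⟩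
        have hq : (2 * q + 1) / 2 = q := by omega
        rw [hq]
        congr 1
        ring
      · rw [if_neg h2, ih (e / 2) (Nat.div_lt_self (by omega) (by omega))]
        obtain ⟨q, rfl⟩ : ∃ q, e = 2 * q := ⟨e / 2, by omega⟩
        have hq : 2 * q / 2 = q := by omega
        rw [hq]
        congr 1
        ring

-- ===== VERDICT (by name: the statement is the Claim_ definition above) =====
theorem rcon_spec : Claim_equal_rcon := by
  intro in_val _ hpre
  unfold Spec_rcon rcon rcon_alt
  by_cases h : in_val = 0
  · simp [h]
  · rw [if_neg h, if_neg h]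
    have := sqmLoop_pow2 (in_val - 1).toNat 0 1
    simp only [pow2, rconLoop, Nat.zero_add, Nat.mul_one] at this
    simpa [show gmul 1 2 = 2 from by decide] using this.symm
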